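-- pv_equiv track=rewrite | github.com/gospeller986/CODE-GREEN | backend/parser.py | check_rec
-- ===== SOURCE A (Python) =====
-- def check_rec(x):
--     isrec = False
--     name = ""
--     t = 0
--     for i in range(len(x)):
--         if 'def' in x[i]:
--             name = x[i].split('(')[0].split(" ")[-1]
--             t = len(x[i + 1]) - len(x[i + 1].lstrip())
--         for j in range(i + 1, len(x)):
--             if len(x[j]) - len(x[j].lstrip()) == 0:
--                 i = j
--                 break
--             else:
--                 if name in x[j]:
--                     isrec = True
--                     return "A Recursive function is Found.It is advisable to use to dyanamic programming to reduce time complexity"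
--     return "no sug"
-- ===== SOURCE B (Python) =====
-- REC_MSG = "A Recursive function is Found.It is advisable to use to dyanamic programming to reduce time complexity"
--
-- def check_rec(x):
--     # One pass over consecutive line pairs: keep the name of the most recently
--     # defined function; an indented line that mentions it is a recursive call.
--     # Before any def the name is "", which substring-matches any line.
--     name = ""
--     for prev, line in zip(x, x[1:]):
--         if 'def' in prev:
--             name = prev.split('(')[0].split(' ')[-1]
--         if line != line.lstrip() and name in line:
--             return REC_MSG
--     return "no sug"
-- ===== Notes on version B (the rewrite author's own statement) =====
-- stated objective: faster
-- what changed: A rescans forward from every line (an inner loop over the following lines until the first unindented one, against the name current at each start point); B makes one pass over consecutive line pairs carrying only the most recent def name. Pre_ excludes inputs with a def on an indented line (with nested defs, which surrounding def a body line is attributed to is unspecified: A checks every name opened in the indented run, B the innermost) and inputs whose last line contains 'def' (A's x[i+1] lookahead raises IndexError there unless an earlier line already triggered the message).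
import Mathlib
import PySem

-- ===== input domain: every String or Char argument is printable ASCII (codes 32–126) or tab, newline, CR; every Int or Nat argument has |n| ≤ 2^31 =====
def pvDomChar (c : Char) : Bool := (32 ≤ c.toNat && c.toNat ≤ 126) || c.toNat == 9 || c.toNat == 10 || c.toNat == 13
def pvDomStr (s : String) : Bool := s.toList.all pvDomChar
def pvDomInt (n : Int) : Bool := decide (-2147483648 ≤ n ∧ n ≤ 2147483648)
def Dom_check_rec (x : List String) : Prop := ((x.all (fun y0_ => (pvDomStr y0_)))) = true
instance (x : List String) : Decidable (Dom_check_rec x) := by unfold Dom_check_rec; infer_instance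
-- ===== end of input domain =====

-- B replaces A's quadratic forward re-scan from every line by one pass over consecutive
-- line pairs carrying the most recent def name (objective: faster).

def pvRecMsg : String := "A Recursive function is Found.It is advisable to use to dyanamic programming to reduce time complexity"

-- x.split('(')[0].split(" ")[-1]  (both [0] and [-1] index nonempty split results, never raise)
def pvNameOf (s : String) : String :=
  let p0 := PySem.List.pyGetD ((PySem.Str.split? s "(").getD []) 0 ""
  PySem.List.pyGetD ((PySem.Str.split? p0 " ").getD []) (-1) ""

-- len(s) - len(s.lstrip())
def pvIndent (s : String) : Int := PySem.Str.len s - PySem.Str.len (PySem.Str.lstrip s)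

-- ===== PORT A =====
-- inner loop: for j in range(i+1, len(x)): break on unindented line, return on a line containing name
def pvInnerA (name : String) : List String → Bool
  | [] => false
  | s :: r => if pvIndent s == 0 then false
              else if PySem.Str.isIn name s then true else pvInnerA name r

-- outer loop over i (suffix form); Python's `t = len(x[i+1]) - len(x[i+1].lstrip())` is computed
-- and never used; its x[i+1] access is the only raise (IndexError, excluded by Pre_), pyGetD-total here
def pvLoopA (name : String) : List String → String
  | [] => "no sug"
  | s :: r =>
      let name' := if PySem.Str.isIn "def" s then pvNameOf s else name
      let _t : Int := if PySem.Str.isIn "def" s then pvIndent (PySem.List.pyGetD r 0 "") else 0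
      if pvInnerA name' r then pvRecMsg else pvLoopA name' r

def check_rec (x : List String) : String := pvLoopA "" x

-- ===== PORT B =====
-- for prev, line in zip(x, x[1:]): update name from prev; fire on an indented line containing name
def pvLoopB (name : String) : List (String × String) → String
  | [] => "no sug"
  | (prev, line) :: r =>
      let name' := if PySem.Str.isIn "def" prev then pvNameOf prev else name
      if (PySem.Str.lstrip line != line) && PySem.Str.isIn name' line then pvRecMsg
      else pvLoopB name' r

def check_rec_alt (x : List String) : String := pvLoopB "" (x.zip x.tail)

-- ===== PRECONDITION & SPEC =====
-- Pre_ excludes (a) inputs with a def on an indented line: with nested defs, which surrounding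
-- def a body line is attributed to is unspecified — A checks every name opened in the current
-- indented run, B the innermost; and (b) inputs whose last line contains 'def': A's x[i+1]
-- lookahead raises IndexError there unless an earlier line already triggered the message
-- (a closed-form, slightly narrower-than-needed exclusion; see claim cites).
def Pre_check_rec (x : List String) : Prop :=
  (x.all (fun s => !((pvIndent s != 0) && PySem.Str.isIn "def" s))) = true ∧
  PySem.Str.isIn "def" (x.getLastD "") = false
instance (x : List String) : Decidable (Pre_check_rec x) := by unfold Pre_check_rec; infer_instance

def pvWitness_check_rec : List String := ["def f(x):", "  return f(x)", "x"]

def Spec_check_rec (x : List String) (out : String) : Prop := out = check_rec_alt x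
instance (x : List String) (out : String) : Decidable (Spec_check_rec x out) := by unfold Spec_check_rec; infer_instance

-- ===== CLAIM =====
def Claim_equal_check_rec : Prop := ∀ (x : List String), Dom_check_rec x → Pre_check_rec x → Spec_check_rec x (check_rec x)

-- ===== LEMMAS AND PROOFS =====

-- Boolean skeletons of the two loops (each loop only ever returns one of two constant strings)
def pvRecA (name : String) : List String → Bool
  | [] => false
  | s :: r =>
      let name' := if PySem.Str.isIn "def" s then pvNameOf s else name
      pvInnerA name' r || pvRecA name' r

def pvRecB (name : String) : List (String × String) → Bool
  | [] => false
  | (prev, line) :: r =>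
      let name' := if PySem.Str.isIn "def" prev then pvNameOf prev else name
      ((PySem.Str.lstrip line != line) && PySem.Str.isIn name' line) || pvRecB name' r

theorem pv_ite_ite_or (a b : Bool) (m n : String) :
    (if a = true then m else if b = true then m else n) = if (a || b) = true then m else n := by
  cases a <;> simp

theorem pvLoopA_eq (l : List String) : ∀ name,
    pvLoopA name l = if pvRecA name l = true then pvRecMsg else "no sug" := by
  induction l with
  | nil => intro name; rfl
  | cons s r ih =>
      intro name
      simp only [pvLoopA, pvRecA, ih, pv_ite_ite_or]
      rfl

theorem pvLoopB_eq (l : List (String × String)) : ∀ name,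
    pvLoopB name l = if pvRecB name l = true then pvRecMsg else "no sug" := by
  induction l with
  | nil => intro name; rfl
  | cons p r ih =>
      intro name
      obtain ⟨prev, line⟩ := p
      simp only [pvLoopB, pvRecB, ih, pv_ite_ite_or]
      rfl

-- B's indentation test (line != line.lstrip()) agrees with A's (len(line)-len(line.lstrip()) == 0)
theorem pv_lstrip_suffix (s : String) : (PySem.Str.lstrip s).toList <:+ s.toList := by
  have h : PySem.Chars.lstrip s.toList = s.toList.dropWhile PySem.Chars.isspace := by
    simp [PySem.Chars.lstrip]
  rw [PySem.Str.toList_lstrip, h]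
  exact List.dropWhile_suffix _

theorem pv_indent_bridge (s : String) :
    (PySem.Str.lstrip s != s) = !(pvIndent s == 0) := by
  have hsuff := pv_lstrip_suffix s
  have hle := hsuff.length_le
  rw [Bool.eq_iff_iff]
  simp only [bne_iff_ne, ne_eq, Bool.not_eq_true', beq_eq_false_iff_ne, pvIndent,
    PySem.Str.len_eq]
  constructor
  · intro hne h
    exact hne (by
      have hlen : (PySem.Str.lstrip s).toList.length = s.toList.length := by omega
      have := hsuff.eq_of_length hlen
      exact String.toList_inj.mp this)
  · intro hne h
    exact hne (by rw [h]; omega)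

-- under Pre_ clause (a), an indented line never contains 'def', so the name is unchanged there
theorem pv_upd_of_ind (s : String) (h : (!((pvIndent s != 0) && PySem.Str.isIn "def" s)) = true)
    (hind : (pvIndent s == 0) = false) (name : String) :
    (if PySem.Str.isIn "def" s then pvNameOf s else name) = name := by
  have hbne : (pvIndent s != 0) = true := by
    rw [bne_iff_ne]
    intro he
    rw [he] at hind
    simp at hind
  rw [hbne, Bool.true_and, Bool.not_eq_true'] at h
  rw [h]
  simp

-- one-step unfoldings of the two skeletons
theorem pvRecA_cons (name s : String) (r : List String) :
    pvRecA name (s :: r) =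
      ((pvInnerA (if PySem.Str.isIn "def" s then pvNameOf s else name) r) ||
        pvRecA (if PySem.Str.isIn "def" s then pvNameOf s else name) r) := rfl

theorem pvRecB_cons (name prev line : String) (r : List (String × String)) :
    pvRecB name ((prev, line) :: r) =
      (((PySem.Str.lstrip line != line) &&
          PySem.Str.isIn (if PySem.Str.isIn "def" prev then pvNameOf prev else name) line) ||
        pvRecB (if PySem.Str.isIn "def" prev then pvNameOf prev else name) r) := rfl

theorem pvInnerA_cons (name s : String) (r : List String) :
    pvInnerA name (s :: r) =
      (if pvIndent s == 0 then false
       else if PySem.Str.isIn name s then true else pvInnerA name r) := rfl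

-- main transposition: under Pre_ clause (a), A's nested scans equal B's pairwise pass
theorem pvRecA_eq_pvRecB (l : List String)
    (hpre : (l.all (fun s => !((pvIndent s != 0) && PySem.Str.isIn "def" s))) = true) :
    ∀ name, pvRecA name l = pvRecB name (l.zip l.tail) := by
  induction l with
  | nil => intro name; rfl
  | cons s r ih =>
      intro name
      rw [List.all_cons, Bool.and_eq_true] at hpre
      obtain ⟨hs, hr⟩ := hpre
      cases r with
      | nil => simp [pvRecA, pvRecB, pvInnerA]
      | cons l2 r2 =>
          have hl2 : (!((pvIndent l2 != 0) && PySem.Str.isIn "def" l2)) = true := by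
            rw [List.all_cons, Bool.and_eq_true] at hr
            exact hr.1
          have ihr := ih hr
          simp only [List.tail_cons] at ihr ⊢
          rw [List.zip_cons_cons, pvRecA_cons, pvRecB_cons, ← ihr, pv_indent_bridge]
          set n' := if PySem.Str.isIn "def" s then pvNameOf s else name with hn'
          by_cases hind : (pvIndent l2 == 0) = true
          · simp only [pvInnerA_cons, hind]
            simp
          · have hind' : (pvIndent l2 == 0) = false := Bool.eq_false_iff.mpr hind
            have hupd := pv_upd_of_ind l2 hl2 hind'
            have hA : pvRecA n' (l2 :: r2) = (pvInnerA n' r2 || pvRecA n' r2) := by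
              rw [pvRecA_cons, hupd]
            simp only [pvInnerA_cons, hind', Bool.false_eq_true, if_false, Bool.not_false,
              Bool.true_and]
            cases hin : PySem.Str.isIn n' l2 with
            | true => simp
            | false =>
                simp only [Bool.false_eq_true, if_false, Bool.false_or]
                rw [hA]
                cases pvInnerA n' r2 <;> simp

-- ===== VERDICT =====
theorem check_rec_spec : Claim_equal_check_rec := by
  intro x _ hpre
  show check_rec x = check_rec_alt x
  unfold check_rec check_rec_alt
  rw [pvLoopA_eq, pvLoopB_eq, pvRecA_eq_pvRecB x hpre.1]
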